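-- pv_equiv track=rewrite | github.com/pnnl/qbeep | Code/qbeep.py | complete_results
-- ===== SOURCE A (Python) =====
-- def complete_results(r_dict: dict):
--     """
--     Complete the results dictionary by adding all possible binary keys that are not featured.
--
--     Args:
--         r_dict (dict): The results dictionary.
--
--     Returns:
--         dict: The completed results dictionary.
--     """
--     # Determine the number of bits based on the length of the keys in the dictionary
--     n_bits = len(list(r_dict.keys())[0])
--
--     # Generate a binary string with all bits set to '1'
--     b_str = ''.join(['1' for _ in range(n_bits)])
--
--     # Iterate from 0 to the maximum binary value
--     for i in range(int(b_str, 2) + 1):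
--         # Convert the decimal value to a binary string representation and pad zeros if necessary
--         key_b = bin(i).lstrip('0b').zfill(n_bits)
--
--         # If the binary key is not present in the results dictionary, add it with a value of 0
--         if key_b not in r_dict:
--             r_dict[key_b] = 0
--
--     return r_dict
-- ===== SOURCE B (Python) =====
-- def complete_results(r_dict: dict):
--     """Fill r_dict, in place, with every binary key of the right width, defaulting to 0."""
--     n_bits = len(next(iter(r_dict)))
--     keys = ['']
--     for _ in range(n_bits):
--         keys = [b + k for b in '01' for k in keys]
--     for key in keys:
--         r_dict.setdefault(key, 0)
--     return r_dict
-- ===== Notes on version B (the rewrite author's own statement) =====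
-- stated objective: idiomatic
-- what changed: B enumerates the width-n bit-strings directly by prefix-doubling a key list and setdefaults each into the dict, instead of looping over the integers 0..2**n-1 and decoding each through bin().lstrip('0b').zfill(); the same in-place mutation of r_dict is kept.
import Mathlib
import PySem

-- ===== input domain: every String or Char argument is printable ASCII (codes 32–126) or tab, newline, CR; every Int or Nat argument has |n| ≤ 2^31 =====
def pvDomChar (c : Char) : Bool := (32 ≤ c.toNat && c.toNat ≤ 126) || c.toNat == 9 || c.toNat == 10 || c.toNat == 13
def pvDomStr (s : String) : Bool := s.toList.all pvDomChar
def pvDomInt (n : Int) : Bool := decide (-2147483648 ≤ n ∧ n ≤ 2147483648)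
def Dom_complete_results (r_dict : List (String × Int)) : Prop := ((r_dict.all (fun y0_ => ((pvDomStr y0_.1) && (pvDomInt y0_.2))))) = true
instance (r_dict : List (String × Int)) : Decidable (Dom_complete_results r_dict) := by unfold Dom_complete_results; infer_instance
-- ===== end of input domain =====

-- B enumerates the width-n bit strings directly (prefix-doubling a key list) and setdefaults each,
-- instead of decoding every integer 0..2^n-1 via bin/lstrip/zfill; idiomatic, same visible mutation
-- of the argument dict (both ports model the RETURN value of that mutated dict).

-- ===== PORT A =====
-- hand port of int(s, 2): exact on the strings A reaches here (b_str is a run of '1' digits;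
-- none = ValueError on the empty string, as int('', 2) raises)
def pvIntBase2? (cs : List Char) : Option Int :=
  if cs = [] ∨ ¬ (cs.all (fun c => c == '0' || c == '1')) then none
  else some (cs.foldl (fun a c => 2 * a + (if c == '1' then 1 else 0)) 0)

def complete_results (r_dict : List (String × Int)) : List (String × Int) :=
  let d0 : PySem.Dict String Int := PySem.Dict.mk r_dict
  -- n_bits = len(list(r_dict.keys())[0])
  match PySem.List.pyGet? (PySem.Dict.keys d0) 0 with
  | none => []          -- IndexError on an empty dict; excluded by Pre_
  | some k0 =>
    let n_bits : Int := PySem.Str.len k0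
    -- b_str = ''.join(['1' for _ in range(n_bits)])
    let b_str : String := PySem.Str.join "" ((PySem.List.pyRange 0 n_bits 1).map (fun _ => "1"))
    match pvIntBase2? b_str.toList with
    | none => []        -- ValueError from int('', 2); excluded by Pre_
    | some m =>
      -- for i in range(int(b_str, 2) + 1): key_b = bin(i).lstrip('0b').zfill(n_bits); insert if missing
      -- .lstrip('0b') is dropWhile (c ∈ {'0','b'}) — exact for left-strip with a char set
      let dF := (PySem.List.pyRange 0 (m + 1) 1).foldl (fun d i =>
        let key_b : String := String.ofList (PySem.Chars.zfill
            ((PySem.Int.toBinChars0b i).dropWhile (fun c => c == '0' || c == 'b')) n_bits)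
        if d.contains key_b then d else d.insert key_b 0) d0
      dF.items

-- ===== PORT B =====
def complete_results_alt (r_dict : List (String × Int)) : List (String × Int) :=
  let d0 : PySem.Dict String Int := PySem.Dict.mk r_dict
  -- n_bits = len(next(iter(r_dict))): StopIteration on an empty dict; excluded by Pre_
  match r_dict.head? with
  | none => []
  | some p =>
    let n_bits : Int := PySem.Str.len p.1
    -- keys = ['']; for _ in range(n_bits): keys = [b + k for b in '01' for k in keys]
    let keys : List (List Char) := (PySem.List.pyRange 0 n_bits 1).foldl
        (fun ks _ => ['0', '1'].flatMap (fun b => ks.map (fun k => b :: k))) [[]]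
    -- for key in keys: r_dict.setdefault(key, 0)
    (keys.foldl (fun d k => d.setdefault (String.ofList k) 0) d0).items

-- ===== PRECONDITION & SPEC =====
-- Pre_ excludes the inputs on which A raises: the empty dict (IndexError on keys[0]) and a first
-- key of length 0 (int('', 2) ValueError).
def Pre_complete_results (r_dict : List (String × Int)) : Prop :=
  (match r_dict.head? with | none => false | some p => p.1 != "") = true
instance (r_dict : List (String × Int)) : Decidable (Pre_complete_results r_dict) := by
  unfold Pre_complete_results; infer_instance
def pvWitness_complete_results : (List (String × Int)) := [("0", 1)]

def Spec_complete_results (r_dict : List (String × Int)) (out : List (String × Int)) : Prop :=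
  out = complete_results_alt r_dict
instance (r_dict : List (String × Int)) (out : List (String × Int)) :
    Decidable (Spec_complete_results r_dict out) := by unfold Spec_complete_results; infer_instance

-- ===== CLAIM (what is proved, stated in full; the proofs are below) =====
def Claim_equal_complete_results : Prop := ∀ (r_dict : List (String × Int)),
  Dom_complete_results r_dict → Pre_complete_results r_dict →
  Spec_complete_results r_dict (complete_results r_dict)
-- ===== LEMMAS AND PROOFS =====

-- binary digits of n, MSB first (myDigits 0 = ['0']), = Nat.toDigits 2
def myDigits (n : Nat) : List Char :=
  if h : n < 2 then [Nat.digitChar n] else myDigits (n / 2) ++ [Nat.digitChar (n % 2)]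
decreasing_by exact Nat.div_lt_self (by omega) (by omega)

def pad (n : Nat) (l : List Char) : List Char := List.replicate (n - l.length) '0' ++ l
def stripped (i : Nat) : List Char := if i = 0 then [] else myDigits i
def keyN (n i : Nat) : List Char := pad n (stripped i)
def prodKeys : Nat → List (List Char)
  | 0 => [[]]
  | n + 1 => (prodKeys n).map ('0' :: ·) ++ (prodKeys n).map ('1' :: ·)

theorem toDigitsCore_eq : ∀ (fuel n : Nat) (ds : List Char), n < fuel →
    Nat.toDigitsCore 2 fuel n ds = myDigits n ++ ds := by
  intro fuel
  induction fuel with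
  | zero => omega
  | succ f ih =>
    intro n ds h
    rw [Nat.toDigitsCore]
    by_cases h2 : n / 2 = 0
    · have hn : n < 2 := by omega
      simp [h2, myDigits, hn, Nat.mod_eq_of_lt hn]
    · have hlt : n / 2 < f := by
        have := Nat.div_lt_self (by omega : 0 < n) (by omega : 1 < 2); omega
      simp only [h2, if_false, ih (n / 2) _ hlt]
      conv_rhs => rw [myDigits]
      rw [dif_neg (show ¬ n < 2 by omega)]
      simp

theorem toDigits_two (n : Nat) : Nat.toDigits 2 n = myDigits n := by
  have := toDigitsCore_eq (n + 1) n [] (by omega)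
  simpa [Nat.toDigits] using this

theorem myDigits_head1 : ∀ i : Nat, 1 ≤ i → (myDigits i).head? = some '1' := by
  intro i
  induction i using Nat.strong_induction_on with
  | _ i ih =>
    intro h1
    rw [myDigits]
    by_cases h : i < 2
    · have : i = 1 := by omega
      simp [h, this, Nat.digitChar]
    · have h2 : 1 ≤ i / 2 := by omega
      have hlt : i / 2 < i := Nat.div_lt_self (by omega) (by omega)
      have := ih (i / 2) hlt h2
      simp [h, List.head?_append, this]

theorem myDigits_ne_nil (i : Nat) : myDigits i ≠ [] := by
  rw [myDigits]; split <;> simp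

theorem stripped_head (i : Nat) : (stripped i).head? = none ∨ (stripped i).head? = some '1' := by
  unfold stripped
  by_cases h : i = 0
  · simp [h]
  · right; simp [h, myDigits_head1 i (by omega)]

theorem strip_eq (i : Nat) :
    ((PySem.Int.toBinChars0b (i : Int)).dropWhile (fun c => c == '0' || c == 'b')) = stripped i := by
  have h0 : ¬ ((i : Int) < 0) := by omega
  rw [PySem.Int.toBinChars0b]
  simp only [h0, if_false, Int.toNat_natCast, toDigits_two]
  by_cases hi : i = 0
  · subst hi
    rw [myDigits]
    simp [stripped, Nat.digitChar, List.dropWhile]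
  · have hh := myDigits_head1 i (by omega)
    cases hmd : myDigits i with
    | nil => exact absurd hmd (myDigits_ne_nil i)
    | cons c t =>
      rw [hmd] at hh
      simp only [List.head?_cons, Option.some.injEq] at hh
      subst hh
      simp [List.dropWhile, stripped, hi, hmd]

theorem zfill_eq (n : Nat) (l : List Char) (h : l.head? = none ∨ l.head? = some '1') :
    PySem.Chars.zfill l (n : Nat) = pad n l := by
  rw [PySem.Chars.zfill.eq_def]
  by_cases hle : (n : Int) ≤ (l.length : Int)
  · have : n - l.length = 0 := by omega
    simp [hle, pad, this]
  · have hlen : l.length < n := by omega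
    cases l with
    | nil => simp [hle, pad]
    | cons c t =>
      simp only [List.head?_cons] at h
      rcases h with h | h
      · exact absurd h (by simp)
      · simp only [Option.some.injEq] at h
        subst h
        simp [hle, pad, show ¬ ('1' = '+' ∨ '1' = '-') by decide, Int.toNat_natCast]
        omega

theorem stripped_len : ∀ (n i : Nat), i < 2 ^ n → (stripped i).length ≤ n := by
  intro n
  induction n with
  | zero => intro i h; interval_cases i; simp [stripped]
  | succ n ih =>
    intro i h
    by_cases h0 : i = 0
    · simp [h0, stripped]
    by_cases h1 : i = 1
    · subst h1
      rw [stripped, if_neg (by omega), myDigits]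
      simp
    · have h2 : 2 ≤ i := by omega
      rw [stripped, if_neg h0, myDigits, dif_neg (by omega)]
      have hd2 : i / 2 < 2 ^ n := by
        have : i < 2 * 2 ^ n := by rw [two_mul]; omega
        omega
      have := ih (i / 2) hd2
      rw [stripped, if_neg (by omega)] at this
      simp only [List.length_append, List.length_singleton]
      omega

theorem myDigits_pow_add : ∀ (n i : Nat), i < 2 ^ n →
    myDigits (2 ^ n + i) = '1' :: pad n (stripped i) := by
  intro n
  induction n with
  | zero =>
    intro i h
    interval_cases i
    rw [myDigits]
    simp [pad, stripped, Nat.digitChar]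
  | succ n ih =>
    intro i h
    have hge : 2 ≤ 2 ^ (n + 1) + i := by
      have : 2 ≤ 2 ^ (n + 1) := by
        have : 2 ^ 1 ≤ 2 ^ (n + 1) := Nat.pow_le_pow_right (by omega) (by omega)
        simpa using this
      omega
    rw [myDigits, dif_neg (by omega)]
    have hdiv : (2 ^ (n + 1) + i) / 2 = 2 ^ n + i / 2 := by
      rw [pow_succ, mul_comm]
      omega
    have hmod : (2 ^ (n + 1) + i) % 2 = i % 2 := by
      rw [pow_succ]
      omega
    have hd2 : i / 2 < 2 ^ n := by
      rw [pow_succ] at h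
      omega
    rw [hdiv, hmod, ih (i / 2) hd2]
    -- now: ('1' :: pad n (stripped (i/2))) ++ [digitChar (i%2)] = '1' :: pad (n+1) (stripped i)
    simp only [List.cons_append, List.cons.injEq, true_and]
    by_cases h0 : i = 0
    · subst h0
      have hd0 : Nat.digitChar 0 = '0' := by decide
      simp [stripped, pad, hd0, ← List.replicate_succ']
    by_cases h1 : i = 1
    · subst h1
      have hm1 : myDigits 1 = ['1'] := by rw [myDigits]; simp; decide
      simp [stripped, pad, hm1, show Nat.digitChar 1 = '1' from by decide]
    · have h2 : 2 ≤ i := by omega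
      have e1 : stripped i = myDigits (i / 2) ++ [Nat.digitChar (i % 2)] := by
        rw [stripped, if_neg h0, myDigits, dif_neg (by omega)]
      have e2 : stripped (i / 2) = myDigits (i / 2) := by
        rw [stripped, if_neg (by omega)]
      rw [e1, e2]
      simp only [pad, List.length_append, List.length_singleton, List.append_assoc]
      have : n + 1 - ((myDigits (i / 2)).length + 1) = n - (myDigits (i / 2)).length := by omega
      rw [this]

theorem keylist : ∀ n : Nat, (List.range (2 ^ n)).map (keyN n) = prodKeys n := by
  intro n
  induction n with
  | zero => simp [List.range_succ, prodKeys, keyN, pad, stripped]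
  | succ n ih =>
    have hsplit : 2 ^ (n + 1) = 2 ^ n + 2 ^ n := by rw [pow_succ]; omega
    rw [hsplit, List.range_add, List.map_append, List.map_map, prodKeys, ← ih,
      List.map_map, List.map_map]
    congr 1
    · apply List.map_congr_left
      intro i hi
      rw [List.mem_range] at hi
      have hlen := stripped_len n i hi
      simp only [Function.comp_apply, keyN, pad]
      have : n + 1 - (stripped i).length = (n - (stripped i).length) + 1 := by omega
      rw [this, List.replicate_succ]
      simp
    · apply List.map_congr_left
      intro i hi
      rw [List.mem_range] at hi
      have hlen := stripped_len n i hi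
      simp only [Function.comp_apply, keyN]
      have hM := myDigits_pow_add n i hi
      have hstr : stripped (2 ^ n + i) = '1' :: pad n (stripped i) := by
        rw [stripped, if_neg (by have := Nat.one_le_two_pow (n := n); omega), hM]
      rw [pad, hstr]
      have hl : ('1' :: pad n (stripped i)).length = n + 1 := by
        simp [pad]; omega
      rw [hl]
      simp

theorem parse_ones : ∀ n : Nat, 1 ≤ n →
    pvIntBase2? (List.replicate n '1') = some ((2 : Int) ^ n - 1) := by
  have key : ∀ n : Nat, (List.replicate n '1').foldl
      (fun (a : Int) c => 2 * a + (if c == '1' then 1 else 0)) 0 = 2 ^ n - 1 := by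
    intro n
    induction n with
    | zero => simp
    | succ n ih =>
      rw [List.replicate_succ', List.foldl_append, ih]
      simp [pow_succ]
      ring
  intro n h
  rw [pvIntBase2?]
  rw [if_neg ?_, key]
  simp only [not_or, not_not]
  refine ⟨?_, ?_⟩
  · intro hnil
    have := congrArg List.length hnil
    simp at this
    omega
  · simp [List.all_eq_true, List.mem_replicate]

theorem setdefault_eq {κ ν : Type} [BEq κ] (d : PySem.Dict κ ν) (k : κ) (v : ν) :
    d.setdefault k v = if d.contains k then d else d.insert k v := by
  by_cases h : d.contains k <;> simp [PySem.Dict.setdefault, PySem.Dict.insert, h]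

theorem foldl_const_iterate {α β : Type} (f : β → β) :
    ∀ (l : List α) (a : β), l.foldl (fun ks _ => f ks) a = f^[l.length] a := by
  intro l
  induction l with
  | nil => simp
  | cons x t ih => intro a; simp [ih, Function.iterate_succ_apply]

theorem iterate_prodKeys : ∀ n : Nat,
    (fun ks : List (List Char) => ['0', '1'].flatMap (fun b => ks.map (fun k => b :: k)))^[n] [[]]
      = prodKeys n := by
  intro n
  induction n with
  | zero => simp [prodKeys]
  | succ n ih =>
    rw [Function.iterate_succ_apply', ih, prodKeys]
    simp [List.flatMap]

-- ===== VERDICT (by name: the statement is the Claim_ definition above) =====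
set_option maxHeartbeats 1000000 in
theorem complete_results_spec : Claim_equal_complete_results := by
  intro r_dict _hDom hPre
  unfold Spec_complete_results
  obtain ⟨p, t, rfl⟩ : ∃ p t, r_dict = p :: t := by
    cases r_dict with
    | nil => simp [Pre_complete_results] at hPre
    | cons p t => exact ⟨p, t, rfl⟩
  have hk : p.1 ≠ "" := by
    simpa [Pre_complete_results] using hPre
  set L : Nat := p.1.toList.length with hL
  have hL1 : 1 ≤ L := by
    rw [hL]
    cases hc : p.1.toList with
    | nil => exact absurd (by simpa using congrArg String.ofList hc) (by simpa using hk)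
    | cons c cs => simp
  unfold complete_results complete_results_alt
  simp only [PySem.Dict.keys, List.map_cons, PySem.List.pyGet?_zero_cons, List.head?_cons]
  -- lengths
  have hlen : PySem.Str.len p.1 = (L : Int) := by simp [PySem.Str.len, hL]
  rw [hlen]
  -- b_str is a run of L ones
  have hbstr : (PySem.Str.join "" ((PySem.List.pyRange 0 (L : Int) 1).map (fun _ => "1"))).toList
      = List.replicate L '1' := by
    rw [PySem.List.pyRange_one]
    simp only [sub_zero, Int.toNat_natCast, List.map_map]
    rw [show ((fun (_ : Int) => "1") ∘ (fun k : Nat => (0 : Int) + ↑k)) = (fun (_ : Nat) => "1")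
      from rfl, List.map_const']
    simp only [List.length_range]
    rw [PySem.Str.join]
    simp only [List.map_replicate]
    have : ("1" : String).toList = ['1'] := rfl
    rw [this]
    have : List.replicate L ['1'] = (List.replicate L '1').map (fun c => [c]) := by
      simp [List.map_replicate]
    rw [this, show ("" : String).toList = ([] : List Char) from rfl,
      PySem.Chars.join_nil_singletons]
    simp
  rw [hbstr]
  simp only [parse_ones L hL1]
  have hm1 : (2 : Int) ^ L - 1 + 1 = ((2 ^ L : Nat) : Int) := by push_cast; ring
  rw [hm1, PySem.List.pyRange_one]
  simp only [sub_zero, Int.toNat_natCast]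
  -- A's fold over range(2^L) with decoded keys = fold over prodKeys L
  have hkeyA : ∀ i : Nat,
      String.ofList (PySem.Chars.zfill
        ((PySem.Int.toBinChars0b ((0 : Int) + (i : Int))).dropWhile
          (fun c => c == '0' || c == 'b')) (L : Int)) = String.ofList (keyN L i) := by
    intro i
    rw [zero_add, strip_eq i, zfill_eq L (stripped i) (stripped_head i)]
    rfl
  rw [List.foldl_map]
  have hAfold : (List.range (2 ^ L)).foldl
      (fun (d : PySem.Dict String Int) (i : Nat) =>
        let key_b := String.ofList (PySem.Chars.zfill
          ((PySem.Int.toBinChars0b ((0 : Int) + (i : Int))).dropWhile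
            (fun c => c == '0' || c == 'b')) (L : Int))
        if d.contains key_b then d else d.insert key_b 0) (PySem.Dict.mk (p :: t))
      = (prodKeys L).foldl
        (fun (d : PySem.Dict String Int) (k : List Char) =>
          if d.contains (String.ofList k) then d else d.insert (String.ofList k) 0)
        (PySem.Dict.mk (p :: t)) := by
    rw [← keylist L, List.foldl_map]
    apply PySem.List.foldl_congr_mem
    intro d i _
    simp only [hkeyA i]
  rw [hAfold]
  -- B's key list is prodKeys L
  have hBkeys : (PySem.List.pyRange 0 (L : Int) 1).foldl
      (fun (ks : List (List Char)) _ => ['0', '1'].flatMap (fun b => ks.map (fun k => b :: k)))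
      [[]] = prodKeys L := by
    rw [foldl_const_iterate]
    rw [PySem.List.length_pyRange_one]
    simp only [sub_zero, Int.toNat_natCast]
    exact iterate_prodKeys L
  rw [hBkeys]
  -- B's setdefault step = A's insert-if-missing step
  refine congrArg PySem.Dict.items ?_
  apply PySem.List.foldl_congr_mem
  intro d k _
  rw [setdefault_eq]
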